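-- pv_equiv track=rewrite | github.com/kylelong/weeklyProblems | explodeString.py | explodeString
-- ===== SOURCE A (Python) =====
-- def explodeString(s):
--     char_map = {}
--     groups = []
--     for c in list(s):
--         char_map[c] = 1 + char_map.get(c, 0)
--
--     for k,v in char_map.items():
--         if k != ' ':
--             groups.append(k * v)
--     return sorted(groups)
-- ===== SOURCE B (Python) =====
-- def explodeString(s):
--     t = sorted(s)
--     out = []
--     i = 0
--     n = len(t)
--     while i < n:
--         j = i
--         while j < n and t[j] == t[i]:
--             j += 1
--         if t[i] != ' ':
--             out.append(t[i] * (j - i))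
--         i = j
--     return out
-- ===== Notes on version B (the rewrite author's own statement) =====
-- stated objective: simpler
-- what changed: B sorts the characters first and emits each maximal non-space run in a single scan, instead of A's frequency dict followed by building and sorting the group strings.
import Mathlib
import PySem

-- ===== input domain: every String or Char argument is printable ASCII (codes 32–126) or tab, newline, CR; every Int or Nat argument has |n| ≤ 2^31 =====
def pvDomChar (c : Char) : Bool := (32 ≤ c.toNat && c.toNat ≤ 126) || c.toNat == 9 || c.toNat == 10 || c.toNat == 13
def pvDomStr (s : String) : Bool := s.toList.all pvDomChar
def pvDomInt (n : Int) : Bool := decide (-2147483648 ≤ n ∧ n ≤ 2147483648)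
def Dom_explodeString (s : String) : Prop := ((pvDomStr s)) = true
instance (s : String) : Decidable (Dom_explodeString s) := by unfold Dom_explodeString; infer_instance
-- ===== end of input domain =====

-- B replaces A's frequency-dict-then-sort strategy by sorting the characters first and
-- scanning off maximal runs in one pass (simpler: no dict and no final sort of the groups).

-- ===== PORT A =====
-- A: build a char -> count dict over the string, turn each non-space entry into k*v, sort the groups.
def explodeString (s : String) : List String :=
  let char_map := s.toList.foldl (fun d c => d.insert c (1 + d.getD c 0)) (PySem.Dict.empty : PySem.Dict Char Int)
  let groups := char_map.items.foldl
    (fun g kv => if kv.1 ≠ ' ' then g ++ [String.ofList (PySem.List.pyRepeat [kv.1] kv.2)] else g)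
    ([] : List String)
  PySem.List.sorted groups (fun x => x) false

-- ===== PORT B =====
-- B (Source B): sort the characters, then scan off maximal runs (Source B's inner while over equal
-- chars = takeWhile/dropWhile), appending c*(run length) for each non-space run.
def pvRuns : List Char → List String
  | [] => []
  | c :: rest =>
      let run := rest.takeWhile (fun x => x == c)
      let rest' := rest.dropWhile (fun x => x == c)
      if c ≠ ' ' then String.ofList (List.replicate (run.length + 1) c) :: pvRuns rest'
      else pvRuns rest'
  termination_by t => t.length
  decreasing_by all_goals
    simpa [Nat.lt_succ_iff] using List.length_dropWhile_le (fun x => x == c) rest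

def explodeString_alt (s : String) : List String :=
  pvRuns (PySem.List.sorted s.toList (fun x => x) false)

-- ===== PRECONDITION & SPEC =====
def Spec_explodeString (s : String) (out : List String) : Prop := out = explodeString_alt s
instance (s : String) (out : List String) : Decidable (Spec_explodeString s out) := by unfold Spec_explodeString; infer_instance

-- ===== CLAIM (what is proved, stated in full; the proofs are below) =====
def Claim_equal_explodeString : Prop := ∀ (s : String), Dom_explodeString s → Spec_explodeString s (explodeString s)

-- ===== LEMMAS AND PROOFS =====

lemma dropWhile_gt (c : Char) (rest : List Char)
    (hs : (c :: rest).Pairwise (· ≤ ·)) :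
    ∀ d ∈ rest.dropWhile (fun x => x == c), c < d := by
  induction rest with
  | nil => simp
  | cons r rs ih =>
    rcases List.pairwise_cons.mp hs with ⟨hle, htail⟩
    by_cases hrc : r = c
    · subst hrc
      rw [List.dropWhile_cons_of_pos (by simp)]
      exact ih (List.pairwise_cons.mpr ⟨fun x hx => hle x (List.mem_cons_of_mem _ hx),
        (List.pairwise_cons.mp htail).2⟩)
    · rw [List.dropWhile_cons_of_neg (by simp [hrc])]
      intro d hd
      have hcr : c < r := lt_of_le_of_ne (hle r (List.mem_cons_self)) (Ne.symm hrc)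
      rcases List.mem_cons.mp hd with h | h
      · exact h ▸ hcr
      · exact lt_of_lt_of_le hcr ((List.pairwise_cons.mp htail).1 d h)

def sdedup : List Char → List Char
  | [] => []
  | c :: rest => c :: sdedup (rest.dropWhile (fun x => x == c))
  termination_by t => t.length
  decreasing_by all_goals
    simpa [Nat.lt_succ_iff] using List.length_dropWhile_le (fun x => x == c) rest

lemma pairwise_dropWhile (c : Char) (rest : List Char)
    (hs : rest.Pairwise (· ≤ ·)) :
    (rest.dropWhile (fun x => x == c)).Pairwise (· ≤ ·) :=
  hs.sublist (List.dropWhile_sublist _)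

lemma mem_sdedup (t : List Char) :
    t.Pairwise (· ≤ ·) → ∀ d, d ∈ sdedup t ↔ d ∈ t := by
  induction t using sdedup.induct with
  | case1 => simp [sdedup]
  | case2 c rest ih =>
    intro h d
    have h' := (List.pairwise_cons.mp h).2
    rw [sdedup]
    have hrest : rest = rest.takeWhile (fun x => x == c) ++ rest.dropWhile (fun x => x == c) :=
      (List.takeWhile_append_dropWhile).symm
    constructor
    · intro hd
      rcases List.mem_cons.mp hd with h1 | h1
      · exact h1 ▸ List.mem_cons_self
      · have := (ih (pairwise_dropWhile c rest h') d).mp h1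
        exact List.mem_cons_of_mem _ (hrest ▸ List.mem_append_right _ this)
    · intro hd
      rcases List.mem_cons.mp hd with h1 | h1
      · exact h1 ▸ List.mem_cons_self
      · rw [hrest] at h1
        rcases List.mem_append.mp h1 with h2 | h2
        · have : d = c := by simpa using List.mem_takeWhile_imp h2
          exact this ▸ List.mem_cons_self
        · exact List.mem_cons_of_mem _ ((ih (pairwise_dropWhile c rest h') d).mpr h2)

lemma sdedup_pairwise_lt (t : List Char) :
    t.Pairwise (· ≤ ·) → (sdedup t).Pairwise (· < ·) := by
  induction t using sdedup.induct with
  | case1 => simp [sdedup]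
  | case2 c rest ih =>
    intro h
    have h' := (List.pairwise_cons.mp h).2
    rw [sdedup]
    refine List.pairwise_cons.mpr ⟨fun d hd => ?_, ih (pairwise_dropWhile c rest h')⟩
    have : d ∈ rest.dropWhile (fun x => x == c) :=
      (mem_sdedup _ (pairwise_dropWhile c rest h') d).mp hd
    exact dropWhile_gt c rest h d this

lemma count_head_sorted (c : Char) (rest : List Char)
    (hs : (c :: rest).Pairwise (· ≤ ·)) :
    (c :: rest).count c = (rest.takeWhile (fun x => x == c)).length + 1 := by
  have hrest : rest = rest.takeWhile (fun x => x == c) ++ rest.dropWhile (fun x => x == c) :=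
    (List.takeWhile_append_dropWhile).symm
  have h1 : (rest.takeWhile (fun x => x == c)).count c = (rest.takeWhile (fun x => x == c)).length := by
    rw [List.count_eq_length]
    intro b hb
    have : b = c := by simpa using List.mem_takeWhile_imp hb
    simp [this]
  have h2 : (rest.dropWhile (fun x => x == c)).count c = 0 := by
    rw [List.count_eq_zero]
    intro hmem
    exact absurd rfl (ne_of_gt (dropWhile_gt c rest hs c hmem))
  rw [List.count_cons_self]
  conv_lhs => rw [hrest]
  rw [List.count_append, h1, h2]

lemma count_tail_sorted (c d : Char) (rest : List Char) (hdc : c < d) :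
    (c :: rest).count d = (rest.dropWhile (fun x => x == c)).count d := by
  have hrest : rest = rest.takeWhile (fun x => x == c) ++ rest.dropWhile (fun x => x == c) :=
    (List.takeWhile_append_dropWhile).symm
  have hdc' : d ≠ c := ne_of_gt hdc
  have h1 : (rest.takeWhile (fun x => x == c)).count d = 0 := by
    rw [List.count_eq_zero]
    intro hmem
    have : d = c := by simpa using List.mem_takeWhile_imp hmem
    exact hdc' this
  have h2 : (c :: rest).count d = rest.count d := by
    simp [Ne.symm hdc']
  rw [h2]
  conv_lhs => rw [hrest]
  rw [List.count_append, h1, Nat.zero_add]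

lemma pvRuns_eq_aux : ∀ (n : Nat) (t : List Char), t.length ≤ n → t.Pairwise (· ≤ ·) →
    pvRuns t = ((sdedup t).filter (fun c => c ≠ ' ')).map
      (fun c => String.ofList (List.replicate (t.count c) c))
  | _, [], _, _ => by simp [pvRuns, sdedup]
  | Nat.succ n, c :: rest, hlen, h => by
    have h' := (List.pairwise_cons.mp h).2
    have hp := pairwise_dropWhile c rest h'
    have hlen' : (rest.dropWhile (fun x => x == c)).length ≤ n := by
      have := List.length_dropWhile_le (fun x => x == c) rest
      simp only [List.length_cons, Nat.succ_le_succ_iff] at hlen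
      omega
    have hmapcong :
        ((sdedup (rest.dropWhile (fun x => x == c))).filter (fun x => x ≠ ' ')).map
          (fun x => String.ofList (List.replicate ((rest.dropWhile (fun x => x == c)).count x) x)) =
        ((sdedup (rest.dropWhile (fun x => x == c))).filter (fun x => x ≠ ' ')).map
          (fun x => String.ofList (List.replicate ((c :: rest).count x) x)) := by
      apply List.map_congr_left
      intro x hx
      have hxmem : x ∈ rest.dropWhile (fun b => b == c) :=
        (mem_sdedup _ hp x).mp (List.mem_of_mem_filter hx)
      rw [← count_tail_sorted c x rest (dropWhile_gt c rest h x hxmem)]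
    rw [pvRuns, sdedup]
    by_cases hc : c = ' '
    · rw [if_neg (by simp [hc]), List.filter_cons_of_neg (by simp [hc]),
        pvRuns_eq_aux n _ hlen' hp, hmapcong]
    · rw [if_pos (by simp [hc]), List.filter_cons_of_pos (by simp [hc]), List.map_cons,
        pvRuns_eq_aux n _ hlen' hp, hmapcong, count_head_sorted c rest h]

lemma pvRuns_eq (t : List Char) (h : t.Pairwise (· ≤ ·)) :
    pvRuns t = ((sdedup t).filter (fun c => c ≠ ' ')).map
      (fun c => String.ofList (List.replicate (t.count c) c)) :=
  pvRuns_eq_aux t.length t le_rfl h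

-- strings of repeated chars compare by their (distinct) leading character
lemma repl_lt (c d : Char) (n m : Nat) (h : c < d) :
    String.ofList (List.replicate (n + 1) c) < String.ofList (List.replicate (m + 1) d) := by
  rw [String.lt_iff_toList_lt]
  simp only [String.toList_ofList, List.replicate_succ]
  exact List.Lex.rel h

-- 'if p(x): out.append(f(x))' over a list, with a propositional test
lemma foldl_append_ite {α β : Type} (p : α → Prop) [DecidablePred p] (f : α → β) :
    ∀ (l : List α) (acc : List β),
      l.foldl (fun g x => if p x then g ++ [f x] else g) acc =
        acc ++ (l.filter (fun x => decide (p x))).map f := by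
  intro l
  induction l with
  | nil => simp
  | cons x xs ih =>
    intro acc
    by_cases hx : p x
    · simp [List.foldl_cons, hx, ih]
    · simp [List.foldl_cons, hx, ih]

-- ===== VERDICT (by name: the statement is the Claim_ definition above) =====
theorem explodeString_spec : Claim_equal_explodeString := by
  intro s _
  unfold Spec_explodeString
  simp only [explodeString, explodeString_alt]
  have hfun : (fun (d : PySem.Dict Char Int) c => d.insert c (1 + d.getD c 0)) =
      (fun (d : PySem.Dict Char Int) c => d.insert c (d.getD c 0 + 1)) := by
    funext d c; rw [Int.add_comm]
  rw [hfun, PySem.Dict.foldl_insert_getD_add_one_eq_counter, PySem.Dict.items_counter,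
    foldl_append_ite (fun kv : Char × Int => kv.1 ≠ ' ') _ _ _]
  rw [List.filter_map, List.map_map, List.nil_append]
  simp only [Function.comp_def, PySem.List.pyRepeat_singleton, Int.toNat_natCast]
  set L := s.toList with hL
  set t := PySem.List.sorted L (fun x => x) false with htdef
  have hperm : t.Perm L := PySem.List.sorted_perm L (fun x => x) false
  have ht : t.Pairwise (· ≤ ·) := by
    simpa using PySem.List.sorted_pairwise L (fun x => x)
  rw [pvRuns_eq t ht]
  have hcnt : ∀ c : Char, t.count c = L.count c := fun c => hperm.count_eq c
  simp only [hcnt]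
  -- both sides are maps of F over filtered nodup char lists
  have hnd1 : (sdedup t).Nodup := (sdedup_pairwise_lt t ht).imp ne_of_lt
  have hnd2 : (PySem.Set.ofList L).Nodup := PySem.Set.nodup_ofList L
  have hmem : ∀ a, a ∈ sdedup t ↔ a ∈ PySem.Set.ofList L := by
    intro a
    rw [mem_sdedup t ht a, PySem.Set.mem_ofList, htdef, PySem.List.mem_sorted]
  have hpermd : (sdedup t).Perm (PySem.Set.ofList L) :=
    (List.perm_ext_iff_of_nodup hnd1 hnd2).mpr hmem
  apply PySem.List.sorted_eq_of_perm_of_pairwise_lt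
  · exact List.Perm.map _ (List.Perm.filter _ hpermd)
  · rw [List.pairwise_map]
    refine List.Pairwise.imp_of_mem ?_ ((sdedup_pairwise_lt t ht).filter _)
    intro a b ha hb hab
    have haL : a ∈ L := by
      have h1 := (mem_sdedup t ht a).mp (List.mem_of_mem_filter ha)
      rw [htdef, PySem.List.mem_sorted] at h1
      exact h1
    have hbL : b ∈ L := by
      have h1 := (mem_sdedup t ht b).mp (List.mem_of_mem_filter hb)
      rw [htdef, PySem.List.mem_sorted] at h1
      exact h1
    have hca : 0 < L.count a := List.count_pos_iff.mpr haL
    have hcb : 0 < L.count b := List.count_pos_iff.mpr hbL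
    obtain ⟨n, hn⟩ : ∃ n, L.count a = n + 1 := ⟨L.count a - 1, by omega⟩
    obtain ⟨m, hm⟩ : ∃ m, L.count b = m + 1 := ⟨L.count b - 1, by omega⟩
    show String.ofList (List.replicate (L.count a) a) < String.ofList (List.replicate (L.count b) b)
    rw [hn, hm]
    exact repl_lt a b n m hab
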